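-- pv_equiv track=rewrite | github.com/envyafish/mr_plugins | plugins/xx/utils.py | get_true_code
-- ===== SOURCE A (Python) =====
-- def get_true_code(input_code: str):
--     code_list = input_code.split('-')
--     code = ''.join(code_list)
--     length = len(code)
--     index = length - 1
--     num = ''
--     all_number = '0123456789'
--     while index > -1:
--         s = code[index]
--         if s not in all_number:
--             break
--         num = s + num
--         index = index - 1
--     prefix = code[0:index + 1]
--     return (prefix + '-' + num).upper()
-- ===== SOURCE B (Python) =====
-- import re
--
--
-- def get_true_code(input_code: str):
--     code = input_code.replace('-', '')
--     m = re.fullmatch(r'(.*?)([0-9]*)', code, re.DOTALL)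
--     return (m.group(1) + '-' + m.group(2)).upper()
-- ===== Notes on version B (the rewrite author's own statement) =====
-- stated objective: idiomatic
-- what changed: Replaced the split/join dash removal and the explicit backward character loop that prepends trailing digits one by one with str.replace plus a single anchored regex fullmatch capturing the non-digit prefix and the trailing digit run.
import Mathlib
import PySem

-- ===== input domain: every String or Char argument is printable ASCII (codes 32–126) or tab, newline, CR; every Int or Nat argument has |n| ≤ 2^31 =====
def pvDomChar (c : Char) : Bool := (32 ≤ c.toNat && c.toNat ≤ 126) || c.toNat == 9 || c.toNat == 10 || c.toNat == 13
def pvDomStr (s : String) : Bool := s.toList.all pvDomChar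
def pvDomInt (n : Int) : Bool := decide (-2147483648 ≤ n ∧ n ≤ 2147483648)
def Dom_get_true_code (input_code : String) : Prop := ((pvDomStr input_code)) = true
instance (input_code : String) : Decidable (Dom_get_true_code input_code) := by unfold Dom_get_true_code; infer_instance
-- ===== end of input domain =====

-- B replaces A's split/join dash removal and manual backward index loop by str.replace plus one
-- anchored regex fullmatch capturing the non-digit prefix and the trailing digit run (idiomatic).


-- ===== PORT A =====
-- the backward while loop: state is (index, num); recursion on i = index + 1 (i = 0 ↔ index = -1)
def pvLoopA (cs : List Char) : Nat → List Char → Nat × List Char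
  | 0, num => (0, num)
  | i + 1, num =>
      let s := cs.getD i ' '
      if ("0123456789".toList.contains s) then pvLoopA cs i (s :: num)
      else (i + 1, num)

def get_true_code (input_code : String) : String :=
  -- code_list = input_code.split('-'); code = ''.join(code_list)
  let code := PySem.Chars.join [] (PySem.Chars.splitOn input_code.toList ['-'])
  -- the while loop, from index = len(code) - 1 downwards
  let r := pvLoopA code code.length []
  -- prefix = code[0:index+1]  (index + 1 = r.1 lies in [0, len], so the slice is a take)
  let pre := code.take r.1
  PySem.Str.upper (String.mk (pre ++ '-' :: r.2))

-- ===== PORT B =====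
-- regex fullmatch r'(.*?)([0-9]*)' (DOTALL): group 2 is the maximal trailing digit run,
-- group 1 everything before it — ported as takeWhile/dropWhile on the reversed string.
def get_true_code_alt (input_code : String) : String :=
  let code := (PySem.Str.replace input_code "-" "").toList
  let rev := code.reverse
  let g2 := (rev.takeWhile PySem.Chars.isdigit).reverse
  let g1 := (rev.dropWhile PySem.Chars.isdigit).reverse
  PySem.Str.upper (String.mk (g1 ++ '-' :: g2))

-- ===== PRECONDITION & SPEC =====
def Spec_get_true_code (input_code : String) (out : String) : Prop := out = get_true_code_alt input_code
instance (input_code : String) (out : String) : Decidable (Spec_get_true_code input_code out) := by unfold Spec_get_true_code; infer_instance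

-- ===== CLAIM (what is proved, stated in full; the proofs are below) =====
def Claim_equal_get_true_code : Prop := ∀ (input_code : String), Dom_get_true_code input_code → Spec_get_true_code input_code (get_true_code input_code)

-- ===== LEMMAS AND PROOFS =====

-- membership in '0123456789' is exactly Chars.isdigit
theorem pv_contains_eq_isdigit (c : Char) :
    ("0123456789".toList.contains c) = PySem.Chars.isdigit c := by
  show (['0','1','2','3','4','5','6','7','8','9'].contains c) = _
  simp only [PySem.Chars.isdigit, Char.le_def, List.contains_cons, List.contains_nil,
    Bool.or_false, UInt32.le_iff_toNat_le]
  rw [Bool.eq_iff_iff]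
  simp only [Bool.or_eq_true, beq_iff_eq, Bool.and_eq_true, decide_eq_true_eq,
    Char.ext_iff, UInt32.ext_iff]
  have h0 : '0'.val.toNat = 48 := rfl
  have h1 : '1'.val.toNat = 49 := rfl
  have h2 : '2'.val.toNat = 50 := rfl
  have h3 : '3'.val.toNat = 51 := rfl
  have h4 : '4'.val.toNat = 52 := rfl
  have h5 : '5'.val.toNat = 53 := rfl
  have h6 : '6'.val.toNat = 54 := rfl
  have h7 : '7'.val.toNat = 55 := rfl
  have h8 : '8'.val.toNat = 56 := rfl
  have h9 : '9'.val.toNat = 57 := rfl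
  rw [h0, h1, h2, h3, h4, h5, h6, h7, h8, h9]
  omega

-- replace s '-' '' filters out the dashes
theorem pv_replace_go (fuel : Nat) : ∀ (l acc : List Char), l.length ≤ fuel →
    PySem.Chars.replace.go ['-'] [] fuel l acc = acc.reverse ++ l.filter (· != '-') := by
  induction fuel with
  | zero =>
    intro l acc h
    have : l = [] := List.eq_nil_of_length_eq_zero (Nat.le_zero.mp h)
    subst this
    simp [PySem.Chars.replace.go]
  | succ n ih =>
    intro l acc h
    match l with
    | [] => simp [PySem.Chars.replace.go]
    | c :: t =>
      have ht : t.length ≤ n := by simpa using h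
      rw [PySem.Chars.replace.go]
      by_cases hc : c = '-'
      · subst hc
        simp only [List.isPrefixOf, beq_self_eq_true, Bool.true_and, if_true, List.length_cons,
          List.length_nil, List.drop_succ_cons, List.drop_zero, List.reverse_nil, List.nil_append]
        rw [ih t acc ht]
        simp
      · have hp : (['-'].isPrefixOf (c :: t)) = false := by
          simp [List.isPrefixOf]; exact fun hh => absurd hh.symm hc
        rw [hp]
        simp only [Bool.false_eq_true, if_false]
        rw [ih t (c :: acc) ht]
        simp [hc]

theorem pv_replace_filter (s : List Char) :
    PySem.Chars.replace s ['-'] [] = s.filter (· != '-') := by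
  rw [PySem.Chars.replace]
  simp only [List.isEmpty_cons, Bool.false_eq_true, if_false]
  simpa using pv_replace_go s.length s []  (Nat.le_refl _)

-- join of splitOn '-' filters out the dashes too
theorem pv_split_go (fuel : Nat) : ∀ (l cur : List Char) (acc : List (List Char)), l.length < fuel →
    (PySem.Chars.splitOn.go ['-'] fuel l cur acc).flatten
      = acc.reverse.flatten ++ cur.reverse ++ l.filter (· != '-') := by
  induction fuel with
  | zero => intro l cur acc h; exact absurd h (Nat.not_lt_zero _)
  | succ n ih =>
    intro l cur acc h
    match l with
    | [] => simp [PySem.Chars.splitOn.go]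
    | c :: t =>
      have ht : t.length < n := by simpa using h
      rw [PySem.Chars.splitOn.go]
      by_cases hc : c = '-'
      · subst hc
        simp only [List.isPrefixOf, beq_self_eq_true, Bool.true_and, if_true, List.length_cons,
          List.length_nil, List.drop_succ_cons, List.drop_zero]
        rw [ih t [] (cur.reverse :: acc) ht]
        simp
      · have hp : (['-'].isPrefixOf (c :: t)) = false := by
          simp [List.isPrefixOf]; exact fun hh => absurd hh.symm hc
        rw [hp]
        simp only [Bool.false_eq_true, if_false]
        rw [ih t (c :: cur) acc ht]
        simp [hc]

theorem pv_intercalate_nil (l : List (List Char)) : List.intercalate [] l = l.flatten := by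
  induction l with
  | nil => simp [List.intercalate]
  | cons x xs ih => cases xs <;> simp_all [List.intercalate, List.intersperse]

theorem pv_join_split (s : List Char) :
    PySem.Chars.join [] (PySem.Chars.splitOn s ['-']) = s.filter (· != '-') := by
  rw [PySem.Chars.join, PySem.Chars.splitOn, pv_intercalate_nil]
  simpa using pv_split_go (s.length + 1) s [] [] (Nat.lt_succ_self _)

-- appending a character beyond the scanned range does not change the loop
theorem pv_loopA_stable (ys : List Char) (c : Char) : ∀ (i : Nat), i ≤ ys.length → ∀ (num : List Char),
    pvLoopA (ys ++ [c]) i num = pvLoopA ys i num := by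
  intro i
  induction i with
  | zero => intro _ num; rfl
  | succ j ih =>
    intro h num
    have hj : j < ys.length := h
    have hget : (ys ++ [c]).getD j ' ' = ys.getD j ' ' := by
      simp [List.getD_eq_getElem?_getD, List.getElem?_append_left hj]
    rw [pvLoopA, pvLoopA, hget]
    by_cases hd : ("0123456789".toList.contains (ys.getD j ' ')) = true
    · rw [if_pos hd, if_pos hd, ih (Nat.le_of_lt hj)]
    · rw [if_neg hd, if_neg hd]

-- the loop, started at the full length, peels the maximal trailing digit run
theorem pv_loopA_spec (cs : List Char) : ∀ (num : List Char),
    pvLoopA cs cs.length num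
      = (cs.length - (cs.reverse.takeWhile PySem.Chars.isdigit).length,
         (cs.reverse.takeWhile PySem.Chars.isdigit).reverse ++ num) := by
  induction cs using List.reverseRecOn with
  | nil => intro num; rfl
  | append_singleton ys c ih =>
    intro num
    have hlen : (ys ++ [c]).length = ys.length + 1 := by simp
    have hget : (ys ++ [c]).getD ys.length ' ' = c := by
      simp [List.getD_eq_getElem?_getD]
    rw [hlen, pvLoopA, hget, pv_contains_eq_isdigit]
    by_cases hd : PySem.Chars.isdigit c = true
    · rw [if_pos hd, pv_loopA_stable ys c ys.length (Nat.le_refl _), ih]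
      simp [hd]
    · rw [if_neg hd]
      have : (ys ++ [c]).reverse.takeWhile PySem.Chars.isdigit = [] := by
        simp [hd]
      rw [this]
      simp

-- the prefix A takes is exactly what B's dropWhile on the reverse leaves
theorem pv_take_aux (P T : List Char) : (P ++ T).take ((P ++ T).length - T.length) = P := by
  have h : (P ++ T).length - T.length = P.length := by simp
  rw [h, List.take_left]

theorem pv_take_eq_rdrop (cs : List Char) :
    cs.take (cs.length - (cs.reverse.takeWhile PySem.Chars.isdigit).length)
      = (cs.reverse.dropWhile PySem.Chars.isdigit).reverse := by
  have hsplit : cs = (cs.reverse.dropWhile PySem.Chars.isdigit).reverse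
      ++ (cs.reverse.takeWhile PySem.Chars.isdigit).reverse := by
    conv_lhs => rw [← cs.reverse_reverse,
      ← List.takeWhile_append_dropWhile (p := PySem.Chars.isdigit) (l := cs.reverse)]
    rw [List.reverse_append]
  have hlen : ((cs.reverse.dropWhile PySem.Chars.isdigit).reverse
        ++ (cs.reverse.takeWhile PySem.Chars.isdigit).reverse).length
      - ((cs.reverse.takeWhile PySem.Chars.isdigit).reverse).length
      = cs.length - (cs.reverse.takeWhile PySem.Chars.isdigit).length := by
    rw [← hsplit]; simp
  have h := pv_take_aux (cs.reverse.dropWhile PySem.Chars.isdigit).reverse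
    (cs.reverse.takeWhile PySem.Chars.isdigit).reverse
  rw [hlen] at h
  rw [← hsplit] at h
  simpa using h

-- ===== VERDICT (by name: the statement is the Claim_ definition above) =====
theorem get_true_code_spec : Claim_equal_get_true_code := by
  intro input_code _
  unfold Spec_get_true_code
  have hB : (PySem.Str.replace input_code "-" "").toList
      = input_code.toList.filter (· != '-') := by
    rw [PySem.Str.toList_replace]
    exact pv_replace_filter _
  simp only [get_true_code, get_true_code_alt, hB, pv_join_split]
  rw [pv_loopA_spec, pv_take_eq_rdrop]
  simp
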